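-- pv_equiv track=rewrite | github.com/zhoubot/linx-isa | tools/isa/validate_spec.py | _pattern_to_mask_match
-- ===== SOURCE A (Python) =====
-- from typing import Any, Dict, List, Tuple
--
-- def _pattern_to_mask_match(pattern: str) -> Tuple[int, int]:
--     # pattern is MSB->LSB with '0','1','.'
--     width_bits = len(pattern)
--     mask = 0
--     match = 0
--     for i, ch in enumerate(pattern):
--         bit = width_bits - 1 - i  # convert to bit index
--         if ch == ".":
--             continue
--         if ch not in ("0", "1"):
--             raise ValueError(f"invalid pattern char {ch!r}")
--         mask |= 1 << bit
--         if ch == "1":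
--             match |= 1 << bit
--     return mask, match
-- ===== SOURCE B (Python) =====
-- from typing import Any, Dict, List, Tuple
--
-- def _pattern_to_mask_match(pattern: str) -> Tuple[int, int]:
--     # pattern is MSB->LSB with '0','1','.'
--     if not pattern:
--         return 0, 0
--     mask_bits = []
--     match_bits = []
--     for ch in pattern:
--         if ch == "1":
--             mask_bits.append("1")
--             match_bits.append("1")
--         elif ch == "0":
--             mask_bits.append("1")
--             match_bits.append("0")
--         elif ch == ".":
--             mask_bits.append("0")
--             match_bits.append("0")
--         else:
--             raise ValueError(f"invalid pattern char {ch!r}")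
--     return int("".join(mask_bits), 2), int("".join(match_bits), 2)
-- ===== Notes on version B (the rewrite author's own statement) =====
-- stated objective: idiomatic
-- what changed: B keeps no bit indices or shifts: it maps each character to a mask digit and a match digit, joins them into two binary strings and parses them with int(s, 2), instead of OR-ing 1 << (width-1-i) into accumulators.
import Mathlib
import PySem

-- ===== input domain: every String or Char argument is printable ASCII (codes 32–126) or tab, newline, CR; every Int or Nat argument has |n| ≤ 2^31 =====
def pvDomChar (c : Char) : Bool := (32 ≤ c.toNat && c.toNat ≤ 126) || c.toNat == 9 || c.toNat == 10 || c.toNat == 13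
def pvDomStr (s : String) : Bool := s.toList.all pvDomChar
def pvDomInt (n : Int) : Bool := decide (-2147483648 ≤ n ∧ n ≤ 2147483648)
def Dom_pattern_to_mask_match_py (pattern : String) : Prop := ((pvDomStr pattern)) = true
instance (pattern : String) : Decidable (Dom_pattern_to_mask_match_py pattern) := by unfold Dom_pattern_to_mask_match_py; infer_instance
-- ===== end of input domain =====

-- B replaces A's explicit bit indices and OR-with-shift accumulation by building two binary
-- digit strings in one pass and parsing them with int(s, 2) (objective: idiomatic, same cost).
-- Pre_ excludes patterns containing a character other than '0', '1', '.', on which A (and B) raise ValueError.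

-- ===== PORT A =====
-- the for-loop over enumerate(pattern); bit = width_bits - 1 - i
def pvGoA : List Char → Nat → Nat → Nat → Nat → Nat × Nat
  | [], _, _, mask, mtch => (mask, mtch)
  | c :: cs, i, n, mask, mtch =>
    let bit := n - 1 - i
    if c = '.' then pvGoA cs (i + 1) n mask mtch
    else if ¬ (c = '0' ∨ c = '1') then (mask, mtch)  -- Python raises ValueError here; excluded by Pre_
    else pvGoA cs (i + 1) n (mask ||| (1 <<< bit))
           (if c = '1' then mtch ||| (1 <<< bit) else mtch)

def pattern_to_mask_match_py (pattern : String) : Int × Int :=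
  let cs := pattern.toList
  let r := pvGoA cs 0 cs.length 0 0   -- mask, match start at 0 (Python ints here are nonnegative)
  ((r.1 : Int), (r.2 : Int))

-- ===== PORT B =====
-- int(s, 2) for a string of '0'/'1' digits (exact on that domain)
def pvParseBin (cs : List Char) : Int :=
  cs.foldl (fun a c => 2 * a + (if c = '1' then 1 else 0)) 0

-- the for-loop appending one digit to each of mask_bits / match_bits
def pvGoB : List Char → List Char → List Char → List Char × List Char
  | [], mk, mt => (mk, mt)
  | c :: cs, mk, mt =>
    if c = '1' then pvGoB cs (mk ++ ['1']) (mt ++ ['1'])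
    else if c = '0' then pvGoB cs (mk ++ ['1']) (mt ++ ['0'])
    else if c = '.' then pvGoB cs (mk ++ ['0']) (mt ++ ['0'])
    else (mk, mt)  -- Python raises ValueError here; excluded by Pre_

def pattern_to_mask_match_py_alt (pattern : String) : Int × Int :=
  let cs := pattern.toList
  if cs = [] then (0, 0)
  else
    let r := pvGoB cs [] []
    (pvParseBin r.1, pvParseBin r.2)

-- ===== PRECONDITION & SPEC =====
-- Pre_ excludes patterns with a character other than '0','1','.', on which A raises ValueError (B raises too).
def Pre_pattern_to_mask_match_py (pattern : String) : Prop :=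
  (pattern.toList.all fun c => c == '0' || c == '1' || c == '.') = true
instance (pattern : String) : Decidable (Pre_pattern_to_mask_match_py pattern) := by
  unfold Pre_pattern_to_mask_match_py; infer_instance

def pvWitness_pattern_to_mask_match_py : String := "10.1"

def Spec_pattern_to_mask_match_py (pattern : String) (out : Int × Int) : Prop := out = pattern_to_mask_match_py_alt pattern
instance (pattern : String) (out : Int × Int) : Decidable (Spec_pattern_to_mask_match_py pattern out) := by unfold Spec_pattern_to_mask_match_py; infer_instance

-- ===== CLAIM (what is proved, stated in full; the proofs are below) =====
def Claim_equal_pattern_to_mask_match_py : Prop := ∀ (pattern : String), Dom_pattern_to_mask_match_py pattern → Pre_pattern_to_mask_match_py pattern → Spec_pattern_to_mask_match_py pattern (pattern_to_mask_match_py pattern)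

-- ===== LEMMAS AND PROOFS =====

-- proof-side values: the mask / match number denoted by a valid pattern suffix
def pvVMask : List Char → Nat
  | [] => 0
  | c :: cs => (if c = '.' then 0 else 2 ^ cs.length) + pvVMask cs

def pvVMatch : List Char → Nat
  | [] => 0
  | c :: cs => (if c = '1' then 2 ^ cs.length else 0) + pvVMatch cs

lemma pv_lor_two_pow (q k : Nat) : (2 ^ (k + 1) * q) ||| 2 ^ k = 2 ^ (k + 1) * q + 2 ^ k := by
  apply Nat.eq_of_testBit_eq
  intro j
  rw [Nat.testBit_or,
      Nat.testBit_two_pow_mul_add q (show 2 ^ k < 2 ^ (k + 1) from Nat.pow_lt_pow_succ (by norm_num)) j,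
      Nat.testBit_two_pow_mul]
  by_cases h : j < k + 1
  · simp [h, Nat.not_le_of_lt h]
  · have hk : k ≠ j := by omega
    simp [h, Nat.le_of_not_lt h, hk]

lemma pvGoA_eq (cs : List Char) : ∀ (i n m t : Nat),
    i + cs.length = n → (∀ c ∈ cs, c = '0' ∨ c = '1' ∨ c = '.') →
    2 ^ cs.length ∣ m → 2 ^ cs.length ∣ t →
    pvGoA cs i n m t = (m + pvVMask cs, t + pvVMatch cs) := by
  induction cs with
  | nil => intro i n m t _ _ _ _; simp [pvGoA, pvVMask, pvVMatch]
  | cons c cs ih =>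
    intro i n m t hn hv hm ht
    have hbit : n - 1 - i = cs.length := by simp at hn; omega
    have hvc := hv c (by simp)
    have hvcs : ∀ c ∈ cs, c = '0' ∨ c = '1' ∨ c = '.' := fun x hx => hv x (by simp [hx])
    have hshift : (1 : Nat) <<< cs.length = 2 ^ cs.length := by
      rw [Nat.shiftLeft_eq, Nat.one_mul]
    obtain ⟨qm, hqm⟩ := hm
    obtain ⟨qt, hqt⟩ := ht
    have hmd : 2 ^ cs.length ∣ m := ⟨2 * qm, by rw [hqm, List.length_cons, pow_succ]; ring⟩
    have htd : 2 ^ cs.length ∣ t := ⟨2 * qt, by rw [hqt, List.length_cons, pow_succ]; ring⟩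
    have hmd' : 2 ^ cs.length ∣ m + 2 ^ cs.length := Dvd.dvd.add hmd dvd_rfl
    have htd' : 2 ^ cs.length ∣ t + 2 ^ cs.length := Dvd.dvd.add htd dvd_rfl
    have hlm : m ||| 2 ^ cs.length = m + 2 ^ cs.length := by
      rw [hqm, List.length_cons]; exact pv_lor_two_pow qm cs.length
    have hlt : t ||| 2 ^ cs.length = t + 2 ^ cs.length := by
      rw [hqt, List.length_cons]; exact pv_lor_two_pow qt cs.length
    have hn' : (i + 1) + cs.length = n := by simp at hn ⊢; omega
    rcases hvc with h0 | h1 | hdot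
    · subst h0
      simp only [pvGoA, hbit, hshift,
        eq_false (by decide : ¬ ('0' : Char) = '.'),
        eq_false (by decide : ¬ ('0' : Char) = '1'),
        true_or, not_true, if_false]
      rw [hlm, ih _ _ _ _ hn' hvcs hmd' htd]
      simp [pvVMask, pvVMatch, Nat.add_assoc]
    · subst h1
      simp only [pvGoA, hbit, hshift,
        eq_false (by decide : ¬ ('1' : Char) = '.'),
        eq_false (by decide : ¬ ('1' : Char) = '0'),
        or_true, not_true, if_false, if_true]
      rw [hlm, hlt, ih _ _ _ _ hn' hvcs hmd' htd']
      simp [pvVMask, pvVMatch, Nat.add_assoc]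
    · subst hdot
      simp only [pvGoA, if_true]
      rw [ih _ _ _ _ hn' hvcs hmd htd]
      simp [pvVMask, pvVMatch]

lemma pvGoB_eq (cs : List Char) : ∀ (mk mt : List Char),
    (∀ c ∈ cs, c = '0' ∨ c = '1' ∨ c = '.') →
    pvGoB cs mk mt = (mk ++ cs.map (fun c => if c = '.' then '0' else '1'),
                      mt ++ cs.map (fun c => if c = '1' then '1' else '0')) := by
  induction cs with
  | nil => intro mk mt _; simp [pvGoB]
  | cons c cs ih =>
    intro mk mt hv
    have hvcs : ∀ x ∈ cs, x = '0' ∨ x = '1' ∨ x = '.' := fun x hx => hv x (by simp [hx])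
    rcases hv c (by simp) with h | h | h <;> subst h <;>
      simp [pvGoB, ih _ _ hvcs]

lemma pvParseBin_acc (cs : List Char) : ∀ (a : Int),
    cs.foldl (fun a c => 2 * a + (if c = '1' then 1 else 0)) a
      = a * 2 ^ cs.length + pvParseBin cs := by
  induction cs with
  | nil => intro a; simp [pvParseBin]
  | cons c cs ih =>
    intro a
    have hP : pvParseBin (c :: cs)
        = ((2 : Int) * 0 + (if c = '1' then 1 else 0)) * 2 ^ cs.length + pvParseBin cs := by
      show List.foldl _ _ _ = _
      exact ih _
    simp only [List.foldl_cons, List.length_cons, ih, hP]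
    ring

lemma pvParseBin_cons (c : Char) (l : List Char) :
    pvParseBin (c :: l) = (if c = '1' then (1 : Int) else 0) * 2 ^ l.length + pvParseBin l := by
  show List.foldl _ ((2 : Int) * 0 + (if c = '1' then 1 else 0)) l = _
  rw [pvParseBin_acc]
  ring

lemma pvParseBin_mask (cs : List Char) :
    pvParseBin (cs.map (fun c => if c = '.' then '0' else '1')) = (pvVMask cs : Int) := by
  induction cs with
  | nil => simp [pvParseBin, pvVMask]
  | cons c cs ih =>
    simp only [List.map_cons, pvParseBin_cons, List.length_map, ih, pvVMask]
    by_cases h : c = '.' <;> simp [h, eq_false (by decide : ¬ ('0' : Char) = '1')]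

lemma pvParseBin_match (cs : List Char) :
    pvParseBin (cs.map (fun c => if c = '1' then '1' else '0')) = (pvVMatch cs : Int) := by
  induction cs with
  | nil => simp [pvParseBin, pvVMatch]
  | cons c cs ih =>
    simp only [List.map_cons, pvParseBin_cons, List.length_map, ih, pvVMatch]
    by_cases h : c = '1' <;> simp [h, eq_false (by decide : ¬ ('0' : Char) = '1')]

-- ===== VERDICT (by name: the statement is the Claim_ definition above) =====
theorem pattern_to_mask_match_py_spec : Claim_equal_pattern_to_mask_match_py := by
  intro pattern _ hpre
  unfold Spec_pattern_to_mask_match_py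
  unfold pattern_to_mask_match_py pattern_to_mask_match_py_alt
  simp only []
  set cs := pattern.toList with hcs
  by_cases hnil : cs = []
  · rw [hnil]
    simp [pvGoA]
  · rw [if_neg hnil]
    have hv : ∀ c ∈ cs, c = '0' ∨ c = '1' ∨ c = '.' := by
      intro c hc
      have h := List.all_eq_true.mp hpre c hc
      simp only [Bool.or_eq_true, beq_iff_eq] at h
      tauto
    rw [pvGoA_eq cs 0 cs.length 0 0 (by simp) hv (dvd_zero _) (dvd_zero _)]
    rw [pvGoB_eq cs [] [] hv]
    simp [pvParseBin_mask, pvParseBin_match]
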